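-- pv_equiv track=rewrite | github.com/AnthonyEsber/python-exercise | module5/hw1.py | analyze_word
-- ===== SOURCE A (Python) =====
-- VOWELS:set[str] = {'a', 'e', 'i', 'o', 'u'}
--
-- def analyze_word(word:str) -> tuple[int, int, str]:
--     word_lenght:int = len(word)
--     vowels_count:int = 0
--     uppsercase_word:str = ''
--
--     for c in word:
--         if c in VOWELS: vowels_count += 1
--
--     uppsercase_word = word.upper()
--
--     return word_lenght, vowels_count, uppsercase_word
-- ===== SOURCE B (Python) =====
-- def analyze_word(word: str) -> tuple[int, int, str]:
--     return len(word), sum(word.count(v) for v in "aeiou"), word.upper()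
-- ===== Notes on version B (the rewrite author's own statement) =====
-- stated objective: idiomatic
-- what changed: Replaced the explicit per-character membership loop with a one-line tuple: len(word), a sum of word.count(v) over the five vowels (five C-level scans instead of one Python-level membership test per character), and word.upper().
import Mathlib
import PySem

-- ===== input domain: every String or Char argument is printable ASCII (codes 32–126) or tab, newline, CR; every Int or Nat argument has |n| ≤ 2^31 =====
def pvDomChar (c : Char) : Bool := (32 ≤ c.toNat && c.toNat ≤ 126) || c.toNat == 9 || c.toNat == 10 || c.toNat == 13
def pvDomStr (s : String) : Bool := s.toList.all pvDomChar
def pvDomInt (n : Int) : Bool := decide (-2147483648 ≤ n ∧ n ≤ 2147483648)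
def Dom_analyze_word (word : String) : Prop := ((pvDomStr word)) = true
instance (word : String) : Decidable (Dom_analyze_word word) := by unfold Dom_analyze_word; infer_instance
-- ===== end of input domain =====

-- B replaces A's per-character membership loop by a one-liner summing word.count(v) over the five vowels (idiomatic; same asymptotic cost).

-- ===== PORT A =====
def pvVOWELS : PySem.Set Char := PySem.Set.ofList ['a', 'e', 'i', 'o', 'u']

def analyze_word (word : String) : Int × Int × String :=
  let word_lenght : Int := (PySem.Str.len word : Int)
  let vowels_count : Int :=
    word.toList.foldl (fun acc c => if pvVOWELS.contains c then acc + 1 else acc) 0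
  let uppsercase_word : String := PySem.Str.upper word
  (word_lenght, vowels_count, uppsercase_word)

-- ===== PORT B =====
def analyze_word_alt (word : String) : Int × Int × String :=
  ( (PySem.Str.len word : Int),
    ("aeiou".toList.map (fun v => (PySem.Str.count word (String.ofList [v]) : Int))).sum,
    PySem.Str.upper word )

-- ===== PRECONDITION & SPEC =====
def Spec_analyze_word (word : String) (out : Int × Int × String) : Prop := out = analyze_word_alt word
instance (word : String) (out : Int × Int × String) : Decidable (Spec_analyze_word word out) := by unfold Spec_analyze_word; infer_instance

-- ===== CLAIM (what is proved, stated in full; the proofs are below) =====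
def Claim_equal_analyze_word : Prop := ∀ (word : String), Dom_analyze_word word → Spec_analyze_word word (analyze_word word)

-- ===== LEMMAS AND PROOFS =====

theorem pv_count_go_single (c : Char) : ∀ (fuel : Nat) (l : List Char) (acc : Nat), l.length ≤ fuel →
    PySem.Chars.count.go [c] fuel l acc = acc + l.count c := by
  intro fuel
  induction fuel with
  | zero => intro l acc h; simp at h; simp [h, PySem.Chars.count.go]
  | succ n ih =>
    intro l acc h
    cases l with
    | nil => simp [PySem.Chars.count.go]
    | cons a t =>
      simp only [PySem.Chars.count.go]
      by_cases hc : a = c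
      · subst hc
        simp [List.isPrefixOf, ih t (acc + 1) (by simpa using h)]
        omega
      · have hp : [c].isPrefixOf (a :: t) = false := by
          simp [List.isPrefixOf]; exact fun h' => hc h'.symm
        simp [hp, ih t acc (by simpa using h), hc]

-- str.count with a single-character needle counts occurrences of that character
theorem pv_count_single (s : List Char) (c : Char) : PySem.Chars.count s [c] = s.count c := by
  simp [PySem.Chars.count, pv_count_go_single c s.length s 0 le_rfl]

-- B's sum of the five per-vowel counts equals A's vowel-membership count
theorem pv_vowel_sum (s : List Char) :
    (['a','e','i','o','u'].map (fun v => (s.count v : Int))).sum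
      = (s.countP (fun c => pvVOWELS.contains c) : Int) := by
  have hv : pvVOWELS = ['a','e','i','o','u'] := by decide
  induction s with
  | nil => simp
  | cons a t ih =>
    simp only [List.map, List.sum_cons, List.sum_nil, List.count_cons, List.countP_cons,
      hv] at ih ⊢
    push_cast
    by_cases h1 : a = 'a' <;> by_cases h2 : a = 'e' <;> by_cases h3 : a = 'i' <;>
      by_cases h4 : a = 'o' <;> by_cases h5 : a = 'u' <;> simp_all <;> omega

-- ===== VERDICT (by name: the statement is the Claim_ definition above) =====
theorem analyze_word_spec : Claim_equal_analyze_word := by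
  intro word _
  unfold Spec_analyze_word analyze_word analyze_word_alt
  refine Prod.ext rfl (Prod.ext ?_ rfl)
  show word.toList.foldl (fun acc c => if pvVOWELS.contains c then acc + 1 else acc) 0
      = ("aeiou".toList.map (fun v => (PySem.Str.count word (String.ofList [v]) : Int))).sum
  rw [PySem.List.foldl_if_add_one]
  have hs : "aeiou".toList = ['a','e','i','o','u'] := by decide
  rw [hs]
  simp only [PySem.Str.count, String.toList_ofList, pv_count_single]
  rw [pv_vowel_sum]
  simp only [zero_add]
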